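-- pv_equiv track=rewrite | github.com/KotekOndrej/Crypto_Model_BS_MedianScore_Recalc | BS_MedianScore_Recalc/__init__.py | find_local_peaks
-- ===== SOURCE A (Python) =====
-- def find_local_peaks(y, k_peaks=60, min_separation=2):
--     peaks = []
--     for i in range(1, len(y) - 1):
--         if y[i] >= y[i - 1] and y[i] >= y[i + 1]:
--             peaks.append((y[i], i))
--     peaks.sort(reverse=True)
--     taken, res = set(), []
--     for _, idx in peaks:
--         if all(abs(idx - j) > min_separation for j in taken):
--             taken.add(idx)
--             res.append(idx)
--         if len(res) >= k_peaks:
--             break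
--     return res
-- ===== SOURCE B (Python) =====
-- def _bisect(ts, x):
--     # leftmost insertion point of x in sorted list ts (hand-written bisect_left)
--     lo, hi = 0, len(ts)
--     while lo < hi:
--         mid = (lo + hi) // 2
--         if ts[mid] < x:
--             lo = mid + 1
--         else:
--             hi = mid
--     return lo
--
-- def find_local_peaks(y, k_peaks=60, min_separation=2):
--     cands = [(y[i], i) for i in range(1, len(y) - 1)
--              if y[i - 1] <= y[i] and y[i] >= y[i + 1]]
--     cands.sort(reverse=True)
--     ts = []   # taken indices, kept sorted: only the two bisect neighbours need testing
--     res = []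
--     for _, idx in cands:
--         p = _bisect(ts, idx)
--         if (p == 0 or idx - ts[p - 1] > min_separation) and \
--            (p == len(ts) or ts[p] - idx > min_separation):
--             ts.insert(p, idx)
--             res.append(idx)
--         if len(res) >= k_peaks:
--             break
--     return res
-- ===== Notes on version B (the rewrite author's own statement) =====
-- stated objective: alternative
-- what changed: B keeps the taken peak positions in a sorted array and binary-searches it, testing only the two nearest neighbours for separation, instead of A's scan of the whole taken set for every candidate.
import Mathlib
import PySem

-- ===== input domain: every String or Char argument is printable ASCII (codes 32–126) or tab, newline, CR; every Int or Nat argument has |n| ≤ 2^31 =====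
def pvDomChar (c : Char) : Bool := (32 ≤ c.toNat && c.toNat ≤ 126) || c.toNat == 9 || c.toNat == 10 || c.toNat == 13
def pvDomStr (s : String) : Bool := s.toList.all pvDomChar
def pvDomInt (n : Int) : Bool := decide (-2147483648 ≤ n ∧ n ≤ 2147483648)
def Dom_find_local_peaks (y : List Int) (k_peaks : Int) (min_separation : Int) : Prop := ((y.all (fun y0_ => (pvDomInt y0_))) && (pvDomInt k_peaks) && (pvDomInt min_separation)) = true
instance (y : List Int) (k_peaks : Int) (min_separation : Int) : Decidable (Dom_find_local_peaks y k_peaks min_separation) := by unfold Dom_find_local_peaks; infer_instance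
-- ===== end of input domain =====

-- B keeps the taken peak positions in a sorted array and binary-searches it, testing only
-- the two nearest neighbours for separation, instead of A's scan of the whole taken set.

-- ===== PORT A =====
-- for _, idx in peaks: greedy selection, scanning the whole 'taken' set each time
def pvALoop (peaks : List (Int × Int)) (k m : Int) (taken : PySem.Set Int) (res : List Int) : List Int :=
  match peaks with
  | [] => res
  | (_, idx) :: rest =>
    let st :=
      if taken.all (fun j => decide (m < |idx - j|)) then
        (PySem.Set.add taken idx, res ++ [idx])
      else (taken, res)
    if k ≤ (st.2.length : Int) then st.2 else pvALoop rest k m st.1 st.2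

def find_local_peaks (y : List Int) (k_peaks : Int) (min_separation : Int) : List Int :=
  let peaks := (PySem.List.pyRange 1 ((y.length : Int) - 1) 1).foldl
    (fun acc i =>
      if PySem.List.pyGetD y i 0 ≥ PySem.List.pyGetD y (i - 1) 0 ∧
         PySem.List.pyGetD y i 0 ≥ PySem.List.pyGetD y (i + 1) 0 then
        acc ++ [(PySem.List.pyGetD y i 0, i)]
      else acc) []
  let peaks := PySem.List.sorted2 peaks Prod.fst Prod.snd true
  pvALoop peaks k_peaks min_separation PySem.Set.empty []

-- ===== PORT B =====
-- _bisect(ts, x): leftmost insertion point in the sorted list ts (hand-written bisect_left);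
-- the while loop runs with the fuel 'hi - lo', an upper bound on its iteration count
def pvBisectGo (ts : List Int) (x : Int) : Nat → Nat → Nat → Nat
  | 0, lo, _hi => lo
  | Nat.succ n, lo, hi =>
    if lo < hi then
      let mid := (lo + hi) / 2
      if ts.getD mid 0 < x then pvBisectGo ts x n (mid + 1) hi
      else pvBisectGo ts x n lo mid
    else lo

def pvBisect (ts : List Int) (x : Int) (lo hi : Nat) : Nat := pvBisectGo ts x (hi - lo) lo hi

-- greedy selection testing only the two bisect neighbours; ts.insert(p, idx) = insertIdx (p ≤ len ts always)
def pvBLoop (cands : List (Int × Int)) (k m : Int) (ts res : List Int) : List Int :=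
  match cands with
  | [] => res
  | (_, idx) :: rest =>
    let p := pvBisect ts idx 0 ts.length
    let st :=
      if (p == 0 || decide (m < idx - ts.getD (p - 1) 0)) &&
         (p == ts.length || decide (m < ts.getD p 0 - idx)) then
        (ts.insertIdx p idx, res ++ [idx])
      else (ts, res)
    if k ≤ (st.2.length : Int) then st.2 else pvBLoop rest k m st.1 st.2

def find_local_peaks_alt (y : List Int) (k_peaks : Int) (min_separation : Int) : List Int :=
  let cands := ((PySem.List.pyRange 1 ((y.length : Int) - 1) 1).filter
      (fun i => decide (PySem.List.pyGetD y (i - 1) 0 ≤ PySem.List.pyGetD y i 0 ∧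
                        PySem.List.pyGetD y i 0 ≥ PySem.List.pyGetD y (i + 1) 0))).map
      (fun i => (PySem.List.pyGetD y i 0, i))
  let cands := PySem.List.sorted2 cands Prod.fst Prod.snd true
  pvBLoop cands k_peaks min_separation [] []

-- ===== PRECONDITION & SPEC =====
def Spec_find_local_peaks (y : List Int) (k_peaks : Int) (min_separation : Int) (out : List Int) : Prop := out = find_local_peaks_alt y k_peaks min_separation
instance (y : List Int) (k_peaks : Int) (min_separation : Int) (out : List Int) : Decidable (Spec_find_local_peaks y k_peaks min_separation out) := by unfold Spec_find_local_peaks; infer_instance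

-- ===== CLAIM (what is proved, stated in full; the proofs are below) =====
def Claim_equal_find_local_peaks : Prop := ∀ (y : List Int) (k_peaks : Int) (min_separation : Int), Dom_find_local_peaks y k_peaks min_separation → Spec_find_local_peaks y k_peaks min_separation (find_local_peaks y k_peaks min_separation)

-- ===== LEMMAS AND PROOFS =====

-- monotone access into a (≤)-sorted list
theorem pvSorted_getD_mono {ts : List Int} (hs : ts.Pairwise (· ≤ ·)) {i j : Nat}
    (hij : i ≤ j) (hj : j < ts.length) : ts.getD i 0 ≤ ts.getD j 0 := by
  rcases eq_or_lt_of_le hij with rfl | hlt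
  · exact le_refl _
  · rw [List.getD_eq_getElem ts 0 (lt_of_le_of_lt hij hj), List.getD_eq_getElem ts 0 hj]
    exact List.pairwise_iff_getElem.mp hs i j _ _ hlt

-- bisect invariant: the returned position separates elements < x from elements ≥ x
theorem pvBisect_spec (ts : List Int) (x : Int) (hs : ts.Pairwise (· ≤ ·)) :
    ∀ lo hi : Nat, lo ≤ hi → hi ≤ ts.length →
    (∀ i, i < lo → ts.getD i 0 < x) →
    (∀ i, hi ≤ i → i < ts.length → x ≤ ts.getD i 0) →
    pvBisect ts x lo hi ≤ ts.length ∧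
    (∀ i, i < pvBisect ts x lo hi → ts.getD i 0 < x) ∧
    (∀ i, pvBisect ts x lo hi ≤ i → i < ts.length → x ≤ ts.getD i 0) := by
  have go : ∀ (n lo hi : Nat), hi - lo ≤ n → lo ≤ hi → hi ≤ ts.length →
      (∀ i, i < lo → ts.getD i 0 < x) →
      (∀ i, hi ≤ i → i < ts.length → x ≤ ts.getD i 0) →
      pvBisectGo ts x n lo hi ≤ ts.length ∧
      (∀ i, i < pvBisectGo ts x n lo hi → ts.getD i 0 < x) ∧
      (∀ i, pvBisectGo ts x n lo hi ≤ i → i < ts.length → x ≤ ts.getD i 0) := by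
    intro n
    induction n with
    | zero =>
      intro lo hi hn hle hhi hL hR
      simp only [pvBisectGo]
      exact ⟨by omega, hL, fun i h1 h2 => hR i (by omega) h2⟩
    | succ n ih =>
      intro lo hi hn hle hhi hL hR
      by_cases hlt : lo < hi
      · have hmid : lo ≤ (lo + hi) / 2 ∧ (lo + hi) / 2 < hi := by omega
        by_cases hc : ts.getD ((lo + hi) / 2) 0 < x
        · simp only [pvBisectGo, if_pos hlt, if_pos hc]
          refine ih _ _ (by omega) (by omega) hhi ?_ hR
          intro i hi'
          exact lt_of_le_of_lt (pvSorted_getD_mono hs (by omega) (by omega)) hc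
        · simp only [pvBisectGo, if_pos hlt, if_neg hc]
          refine ih _ _ (by omega) (by omega) (by omega) hL ?_
          intro i hi1 hi2
          exact le_trans (le_of_not_gt hc) (pvSorted_getD_mono hs hi1 hi2)
      · simp only [pvBisectGo, if_neg hlt]
        have : lo = hi := by omega
        exact ⟨by omega, hL, fun i h1 h2 => hR i (by omega) h2⟩
  intro lo hi hle hhi hL hR
  exact go (hi - lo) lo hi le_rfl hle hhi hL hR

-- the two-neighbour test on a sorted list is the full separation test
theorem pvCheck_iff (ts : List Int) (idx m : Int) (hs : ts.Pairwise (· ≤ ·)) :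
    (((pvBisect ts idx 0 ts.length == 0) ||
        decide (m < idx - ts.getD (pvBisect ts idx 0 ts.length - 1) 0)) &&
      ((pvBisect ts idx 0 ts.length == ts.length) ||
        decide (m < ts.getD (pvBisect ts idx 0 ts.length) 0 - idx))) = true ↔
    ∀ j ∈ ts, m < |idx - j| := by
  obtain ⟨hp, hLp, hRp⟩ := pvBisect_spec ts idx hs 0 ts.length (by omega) le_rfl
    (by intro i h1; omega) (by intro i h1 h2; omega)
  constructor
  · intro h j hj
    rw [Bool.and_eq_true, Bool.or_eq_true, Bool.or_eq_true] at h
    obtain ⟨h1, h2⟩ := h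
    obtain ⟨i, hi, hji⟩ := List.mem_iff_getElem.mp hj
    have hjd : j = ts.getD i 0 := by rw [List.getD_eq_getElem ts 0 hi, hji]
    by_cases hip : i < pvBisect ts idx 0 ts.length
    · have hpne : pvBisect ts idx 0 ts.length ≠ 0 := by omega
      rcases h1 with h1 | h1
      · exact absurd (by simpa using h1) hpne
      · rw [decide_eq_true_iff] at h1
        have h3 := pvSorted_getD_mono hs (show i ≤ pvBisect ts idx 0 ts.length - 1 by omega)
          (show pvBisect ts idx 0 ts.length - 1 < ts.length by omega)
        have h4 := hLp i hip
        rcases abs_cases (idx - j) with ⟨e, _⟩ | ⟨e, _⟩ <;> omega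
    · have hplt : pvBisect ts idx 0 ts.length ≠ ts.length := by omega
      rcases h2 with h2 | h2
      · exact absurd (by simpa using h2) hplt
      · rw [decide_eq_true_iff] at h2
        have h3 := pvSorted_getD_mono hs (show pvBisect ts idx 0 ts.length ≤ i by omega) hi
        have h4 := hRp i (by omega) hi
        rcases abs_cases (idx - j) with ⟨e, _⟩ | ⟨e, _⟩ <;> omega
  · intro hall
    rw [Bool.and_eq_true, Bool.or_eq_true, Bool.or_eq_true]
    constructor
    · by_cases hp0 : pvBisect ts idx 0 ts.length = 0
      · left; simp [hp0]
      · right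
        have hplen : pvBisect ts idx 0 ts.length - 1 < ts.length := by omega
        have hmem : ts.getD (pvBisect ts idx 0 ts.length - 1) 0 ∈ ts := by
          rw [List.getD_eq_getElem ts 0 hplen]; exact List.getElem_mem _
        have h5 := hall _ hmem
        have h6 := hLp (pvBisect ts idx 0 ts.length - 1) (by omega)
        rw [decide_eq_true_iff]
        rcases abs_cases (idx - ts.getD (pvBisect ts idx 0 ts.length - 1) 0) with ⟨e, _⟩ | ⟨e, _⟩ <;> omega
    · by_cases hpl : pvBisect ts idx 0 ts.length = ts.length
      · left; simp [hpl]
      · right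
        have hplen : pvBisect ts idx 0 ts.length < ts.length := by omega
        have hmem : ts.getD (pvBisect ts idx 0 ts.length) 0 ∈ ts := by
          rw [List.getD_eq_getElem ts 0 hplen]; exact List.getElem_mem _
        have h5 := hall _ hmem
        have h6 := hRp (pvBisect ts idx 0 ts.length) le_rfl hplen
        rw [decide_eq_true_iff]
        rcases abs_cases (idx - ts.getD (pvBisect ts idx 0 ts.length) 0) with ⟨e, _⟩ | ⟨e, _⟩ <;> omega

-- sortedness is preserved by inserting at the bisect position
theorem pvInsert_sorted {ts : List Int} {x : Int} {p : Nat} (hs : ts.Pairwise (· ≤ ·))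
    (hp : p ≤ ts.length) (hL : ∀ i, i < p → ts.getD i 0 < x)
    (hR : ∀ i, p ≤ i → i < ts.length → x ≤ ts.getD i 0) :
    (ts.insertIdx p x).Pairwise (· ≤ ·) := by
  have hlen : (ts.insertIdx p x).length = ts.length + 1 := List.length_insertIdx_of_le_length hp x
  rw [List.pairwise_iff_getElem] at hs ⊢
  intro i j hi hj hij
  have hgd : ∀ (a : Nat) (ha : a < ts.length), ts[a] = ts.getD a 0 :=
    fun a ha => (List.getD_eq_getElem ts 0 ha).symm
  by_cases hjp : j < p
  · rw [List.getElem_insertIdx_of_lt (by omega), List.getElem_insertIdx_of_lt (by omega)]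
    exact hs i j (by omega) (by omega) hij
  · by_cases hjep : j = p
    · subst hjep
      rw [List.getElem_insertIdx_of_lt (by omega), List.getElem_insertIdx_self (by omega)]
      have := hL i (by omega)
      rw [hgd i (by omega)]
      omega
    · have hpj : p < j := by omega
      have hj1 : j - 1 < ts.length := by omega
      by_cases hip : i < p
      · rw [List.getElem_insertIdx_of_lt (by omega), List.getElem_insertIdx_of_gt (by omega)]
        have h1 := hL i (by omega)
        have h2 := hR (j - 1) (by omega) (by omega)
        rw [hgd i (by omega), hgd _ hj1]
        omega
      · by_cases hiep : i = p
        · subst hiep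
          rw [List.getElem_insertIdx_self (by omega), List.getElem_insertIdx_of_gt (by omega)]
          have h2 := hR (j - 1) (by omega) (by omega)
          rw [hgd _ hj1]
          exact h2
        · rw [List.getElem_insertIdx_of_gt (by omega), List.getElem_insertIdx_of_gt (by omega)]
          exact hs (i - 1) (j - 1) (by omega) (by omega) (by omega)

-- the two greedy loops agree whenever 'taken' and 'ts' hold the same positions and ts is sorted
theorem pvLoop_eq (peaks : List (Int × Int)) (k m : Int) (taken : PySem.Set Int)
    (ts res : List Int) (hmem : ∀ j : Int, j ∈ taken ↔ j ∈ ts)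
    (hs : ts.Pairwise (· ≤ ·)) :
    pvALoop peaks k m taken res = pvBLoop peaks k m ts res := by
  induction peaks generalizing taken ts res with
  | nil => rfl
  | cons hd rest ih =>
    obtain ⟨v, idx⟩ := hd
    obtain ⟨hp, hLp, hRp⟩ := pvBisect_spec ts idx hs 0 ts.length (by omega) le_rfl
      (by intro i h1; omega) (by intro i h1 h2; omega)
    have hEq : (taken.all fun j => decide (m < |idx - j|)) =
        (((pvBisect ts idx 0 ts.length == 0) ||
            decide (m < idx - ts.getD (pvBisect ts idx 0 ts.length - 1) 0)) &&
          ((pvBisect ts idx 0 ts.length == ts.length) ||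
            decide (m < ts.getD (pvBisect ts idx 0 ts.length) 0 - idx))) := by
      rw [Bool.eq_iff_iff, pvCheck_iff ts idx m hs]
      simp only [List.all_eq_true, decide_eq_true_iff]
      constructor
      · intro h j hj; exact h j ((hmem j).mpr hj)
      · intro h j hj; exact h j ((hmem j).mp hj)
    rw [pvALoop, pvBLoop, hEq]
    by_cases hc : (((pvBisect ts idx 0 ts.length == 0) ||
            decide (m < idx - ts.getD (pvBisect ts idx 0 ts.length - 1) 0)) &&
          ((pvBisect ts idx 0 ts.length == ts.length) ||
            decide (m < ts.getD (pvBisect ts idx 0 ts.length) 0 - idx))) = true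
    · simp only [hc, if_pos]
      by_cases hk : k ≤ ((res ++ [idx]).length : Int)
      · rw [if_pos hk, if_pos hk]
      · rw [if_neg hk, if_neg hk]
        apply ih
        · intro j
          rw [PySem.Set.mem_add, List.mem_insertIdx hp]
          rw [hmem j]
          tauto
        · exact pvInsert_sorted hs hp hLp hRp
    · rw [Bool.not_eq_true] at hc
      simp only [hc, Bool.false_eq_true, ite_false]
      by_cases hk : k ≤ ((res).length : Int)
      · rw [if_pos hk, if_pos hk]
      · rw [if_neg hk, if_neg hk]
        exact ih taken ts res hmem hs

-- the peak-collecting pass of A equals B's comprehension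
theorem pvPeaks_eq (y : List Int) :
    (PySem.List.pyRange 1 ((y.length : Int) - 1) 1).foldl
      (fun acc i =>
        if PySem.List.pyGetD y i 0 ≥ PySem.List.pyGetD y (i - 1) 0 ∧
           PySem.List.pyGetD y i 0 ≥ PySem.List.pyGetD y (i + 1) 0 then
          acc ++ [(PySem.List.pyGetD y i 0, i)]
        else acc) [] =
    ((PySem.List.pyRange 1 ((y.length : Int) - 1) 1).filter
      (fun i => decide (PySem.List.pyGetD y (i - 1) 0 ≤ PySem.List.pyGetD y i 0 ∧
                        PySem.List.pyGetD y i 0 ≥ PySem.List.pyGetD y (i + 1) 0))).map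
      (fun i => (PySem.List.pyGetD y i 0, i)) := by
  rw [PySem.List.foldl_append_ite]
  simp only [List.nil_append]

-- ===== VERDICT (by name: the statement is the Claim_ definition above) =====
theorem find_local_peaks_spec : Claim_equal_find_local_peaks := by
  intro y k m _
  unfold Spec_find_local_peaks find_local_peaks find_local_peaks_alt
  rw [pvPeaks_eq]
  exact pvLoop_eq _ k m _ _ _ (fun j => by simp [PySem.Set.empty]) (by simp)
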